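-- pv_equiv track=rewrite | github.com/buildingSMART/IFC4.3.x-development | code/to_bsdd.py | filter_concepts
-- ===== SOURCE A (Python) =====
-- EXCLUDED_ENTITIES = ['IfcApplication','IfcOwnerHistory','IfcTable','IfcTableColumn','IfcTableRow','IfcChangeActionEnum','IfcGloballyUniqueId','IfcStateEnum','IfcShell','IfcAdvancedFace',
--                      'IfcClosedShell','IfcConnectedFaceSet','IfcEdge','IfcEdgeCurve','IfcEdgeLoop','IfcFace','IfcFaceBound','IfcFaceOuterBound','IfcFaceSurface','IfcLoop','IfcOpenShell',
--                      'IfcOrientedEdge','IfcPath','IfcPolyLoop','IfcSubedge','IfcTopologicalRepresentationItem','IfcVertex','IfcVertexLoop','IfcVertexPoint','IfcBoundaryNodeConditionWarping',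
--                      'IfcStructuralLoadConfiguration','IfcStructuralLoadOrResult','IfcStructuralLoadSingleDisplacement','IfcStructuralLoadSingleDisplacementDistortion',
--                      'IfcStructuralLoadSingleForceWarping','IfcSurfaceReinforcementArea','IfcGeometricProjectionEnum','IfcGlobalOrLocalEnum','IfcWellKnownTextLiteral',
--                      'IfcCoordinateOperation','IfcCoordinateReferenceSystem','IfcGeographicCRS','IfcGeometricRepresentationContext','IfcGeometricRepresentationSubContext','IfcMapConversion',
--                      'IfcMapConversionScaled','IfcMaterialDefinitionRepresentation','IfcProductDefinitionShape','IfcProductRepresentation','IfcProjectedCRS','IfcRepresentation',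
--                      'IfcRepresentationContext','IfcRigidOperation','IfcShapeAspect','IfcShapeModel','IfcShapeRepresentation','IfcStyleModel','IfcStyledRepresentation','IfcTopologyRepresentation',
--                      'IfcWellKnownText','IfcCurveInterpolationEnum','IfcExtendedProperties','IfcPreDefinedProperties','IfcProfileTypeEnum','IfcReinforcingBarRoleEnum','IfcReinforcingBarSurfaceEnum',
--                      'IfcSectionTypeEnum','IfcArbitraryProfileDefWithVoids','IfcProfileProperties','IfcReinforcementBarProperties','IfcSectionProperties','IfcSectionReinforcementProperties',
--                      'IfcLayeredItem','IfcLightDistributionCurveEnum','IfcLightEmissionSourceEnum','IfcLightDistributionData','IfcLightIntensityDistribution','IfcLightSourceAmbient',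
--                      'IfcLightSourceDirectional','IfcLightSourceGoniometric','IfcLightSourcePositional','IfcLightSourceSpot','IfcPresentationLayerAssignment','IfcPresentationLayerWithStyle',
--                      'IfcBoxAlignment','IfcTextPath','IfcAnnotationFillArea','IfcPlanarBox','IfcPlanarExtent','IfcPresentationItem','IfcTextLiteral','IfcTextLiteralWithExtent','IfcBinary',
--                      'IfcBoolean','IfcDerivedUnitEnum','IfcIdentifier','IfcInteger','IfcLabel','IfcLogical','IfcPHMeasure','IfcPositiveInteger','IfcReal','IfcSIPrefix','IfcSIUnitName','IfcText',
--                      'IfcUnitEnum','IfcConversionBasedUnitWithOffset','IfcDerivedUnitElement','IfcDimensionalExponents','IfcUnitAssignment','IfcDirectionSenseEnum','IfcLayerSetDirectionEnum',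
--                      'IfcArcIndex','IfcAxis2Placement','IfcBSplineCurveForm','IfcBSplineSurfaceForm','IfcCurveOnSurface','IfcDimensionCount','IfcKnotType','IfcLineIndex',
--                      'IfcPreferredSurfaceCurveRepresentation','IfcTransitionCode','IfcVectorOrDirection','IfcAxis1Placement','IfcAxis2Placement2D','IfcAxis2Placement3D','IfcAxis2PlacementLinear',
--                      'IfcBSplineCurveWithKnots','IfcDirection','IfcBSplineSurface','IfcBSplineSurfaceWithKnots','IfcBoundedSurface','IfcClothoid','IfcCompositeCurveOnSurface',
--                      'IfcCompositeCurveSegment','IfcConic','IfcCosineSpiral','IfcCurveBoundedPlane','IfcCurveBoundedSurface','IfcCurveSegment','IfcCylindricalSurface','IfcElementarySurface',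
--                      'IfcGeometricRepresentationItem','IfcMappedItem','IfcOffsetCurve2D','IfcOffsetCurve3D','IfcOffsetCurveByDistances','IfcPlacement','IfcPointByDistanceExpression',
--                      'IfcPointOnSurface','IfcRationalBSplineCurveWithKnots','IfcRationalBSplineSurfaceWithKnots','IfcRectangularTrimmedSurface','IfcReparametrisedCompositeCurveSegment',
--                      'IfcRepresentationItem','IfcRepresentationMap','IfcSecondOrderPolynomialSpiral','IfcSegment','IfcSeventhOrderPolynomialSpiral','IfcSineSpiral','IfcSphericalSurface',
--                      'IfcSurfaceOfLinearExtrusion','IfcSurfaceOfRevolution','IfcSweptSurface','IfcThirdOrderPolynomialSpiral','IfcToroidalSurface','IfcBooleanOperand','IfcBooleanOperator',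
--                      'IfcAdvancedBrep','IfcAdvancedBrepWithVoids','IfcBlock','IfcBooleanClippingResult','IfcBooleanResult','IfcBoundingBox','IfcBoxedHalfSpace','IfcCsgPrimitive3D',
--                      'IfcExtrudedAreaSolidTapered','IfcFaceBasedSurfaceModel','IfcFacetedBrep','IfcFacetedBrepWithVoids','IfcGeometricCurveSet','IfcGeometricSet','IfcIndexedPolygonalFace',
--                      'IfcIndexedPolygonalFaceWithVoids','IfcManifoldSolidBrep','IfcPolygonalBoundedHalfSpace','IfcPolygonalFaceSet','IfcRectangularPyramid','IfcRevolvedAreaSolidTapered',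
--                      'IfcRightCircularCone','IfcRightCircularCylinder','IfcSectionedSolidHorizontal','IfcSectionedSpine','IfcSectionedSurface','IfcShellBasedSurfaceModel','IfcSolidModel',
--                      'IfcSphere','IfcSweptDiskSolidPolygonal','IfcTessellatedFaceSet','IfcTessellatedItem','IfcTriangulatedFaceSet','IfcTriangulatedIrregularNetwork','IfcAlignmentCantSegmentTypeEnum',
--                      'IfcAlignmentHorizontalSegmentTypeEnum','IfcAlignmentVerticalSegmentTypeEnum','IfcPointOrVertexPoint','IfcSolidOrShell','IfcSurfaceOrFaceSurface','IfcAlignmentCantSegment',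
--                      'IfcAlignmentHorizontalSegment','IfcAlignmentParameterSegment','IfcAlignmentVerticalSegment','IfcGridAxis','IfcGridPlacement','IfcLinearPlacement','IfcLocalPlacement',
--                      'IfcObjectPlacement','IfcVirtualGridIntersection','IfcDocumentConfidentialityEnum','IfcLanguageId','IfcDocumentStatusEnum','IfcClassification','IfcDataOriginEnum','IfcDate',
--                      'IfcDateTime','IfcDuration','IfcRecurrenceTypeEnum','IfcTaskDurationEnum','IfcTime','IfcTimeSeriesDataTypeEnum','IfcTimeStamp','IfcEventTime','IfcIrregularTimeSeries','IfcLagTime',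
--                      'IfcRecurrencePattern','IfcRegularTimeSeries','IfcResourceTime','IfcSchedulingTime','IfcTaskTime','IfcTaskTimeRecurring','IfcTimePeriod','IfcTimeSeries','IfcWorkTime',
--                      'IfcArithmeticOperatorEnum','IfcBenchmarkEnum','IfcConstraintEnum','IfcLogicalOperatorEnum','IfcObjectiveEnum','IfcConstraint','IfcMetric','IfcObjective','IfcApproval',
--                      'IfcAddressTypeEnum','IfcRoleEnum','IfcAddressTypeEnum','IfcRoleEnum','IfcActorRole','IfcAddress','IfcOrganization','IfcPerson','IfcPersonAndOrganization','IfcPostalAddress',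
--                      'IfcTelecomAddress','IfcCurve','IfcCircle','IfcEllipse','IfcLine','IfcPlane','IfcPoint','IfcPolyline','IfcSpiral','IfcSurface','IfcVector']
--
-- def filter_concepts(di):
--     """ Skip certain concepts to reduce amount of definitions in bSDD. """
--
--     # children = defaultdict(list)
--     # for k, v in di.items():
--     #     if v.get("Parent"):
--     #         children[v.get("Parent")].append(k)
--
--     def parents(k):
--         yield k
--         v = di.get(k)
--         if v and v.get('Parent'):
--             yield from parents(v.get('Parent'))
--
--     # def child_or_self_has_psets(k):
--     #     ps = di.get(k, {}).get("Psets")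
--     #     if ps:
--     #         if set(ps.keys()) - {"Attributes"}:
--     #             return True
--     #     for c in children[k]:
--     #         if child_or_self_has_psets(c):
--     #             return True
--     #     return False
--
--     # def has_child(k):
--     #     def has_child_(k2):
--     #         if k2 == k: return True
--     #         if not children[k2]: return False
--     #         return any(has_child_(c) for c in children[k2])
--     #     return has_child_
--
--     def should_include(k, v):
--         # PREVIOUSLY return ("IfcProduct" in parents(k)) or has_child("IfcProduct")(k) or child_or_self_has_psets(k)
--         # but decided to widen to also include all non-products that have psets, like IfcActor.
--         # return ("IfcRoot" in parents(k)) or ("IfcMaterialDefinition" in parents(k)) or ("IfcProfileDef" in parents(k)) or child_or_self_has_psets(k)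
--         # Now skipping relations ('IfcRelAssociatesClassification'), types ('IfcWallType'), property definitions ('IfcPropertySingleValue'), Resources and some other abstract concepts.
--         result = False
--         if not (k.startswith(('IfcRel','IfcProperty','IfcProperty','IfcQuantity','IfcConnection','IfcCartesian')) or k.endswith(('Relationship','Type','Definition','Usage','Property','Template','Resource','Select','Measure','Condition','ProfileDef','Value','Property','Quantity','Unit','Curve','Number','Reference','Information','Solid')) or any(x in parents(k) for x in ["IfcPropertyAbstraction","IfcConstraint","IfcRepresentationItem","IfcPresentationItem","IfcPresentationStyle","IfcPropertyDefinition","IfcTypeObject","IfcMaterialDefinition","IfcMaterialUsageDefinition"]) or any(z.endswith("Resource") for z in parents(k)) or (k in EXCLUDED_ENTITIES)):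
--             result = True
--         # bypass for selected classes:
--         elif k in ('IfcMaterial'): #,'IfcLightSource','IfcBoundingBox','IfcPoint','IfcCurve','IfcSegment','IfcDirection','IfcSurface','IfcVector'):
--             result = True
--         return result
--     return {k: v for k, v in di.items() if should_include(k, v)}
-- ===== SOURCE B (Python) =====
-- EXCLUDED_ENTITIES = ['IfcApplication','IfcOwnerHistory','IfcTable','IfcTableColumn','IfcTableRow','IfcChangeActionEnum','IfcGloballyUniqueId','IfcStateEnum','IfcShell','IfcAdvancedFace',
--                      'IfcClosedShell','IfcConnectedFaceSet','IfcEdge','IfcEdgeCurve','IfcEdgeLoop','IfcFace','IfcFaceBound','IfcFaceOuterBound','IfcFaceSurface','IfcLoop','IfcOpenShell',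
--                      'IfcOrientedEdge','IfcPath','IfcPolyLoop','IfcSubedge','IfcTopologicalRepresentationItem','IfcVertex','IfcVertexLoop','IfcVertexPoint','IfcBoundaryNodeConditionWarping',
--                      'IfcStructuralLoadConfiguration','IfcStructuralLoadOrResult','IfcStructuralLoadSingleDisplacement','IfcStructuralLoadSingleDisplacementDistortion',
--                      'IfcStructuralLoadSingleForceWarping','IfcSurfaceReinforcementArea','IfcGeometricProjectionEnum','IfcGlobalOrLocalEnum','IfcWellKnownTextLiteral',
--                      'IfcCoordinateOperation','IfcCoordinateReferenceSystem','IfcGeographicCRS','IfcGeometricRepresentationContext','IfcGeometricRepresentationSubContext','IfcMapConversion',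
--                      'IfcMapConversionScaled','IfcMaterialDefinitionRepresentation','IfcProductDefinitionShape','IfcProductRepresentation','IfcProjectedCRS','IfcRepresentation',
--                      'IfcRepresentationContext','IfcRigidOperation','IfcShapeAspect','IfcShapeModel','IfcShapeRepresentation','IfcStyleModel','IfcStyledRepresentation','IfcTopologyRepresentation',
--                      'IfcWellKnownText','IfcCurveInterpolationEnum','IfcExtendedProperties','IfcPreDefinedProperties','IfcProfileTypeEnum','IfcReinforcingBarRoleEnum','IfcReinforcingBarSurfaceEnum',
--                      'IfcSectionTypeEnum','IfcArbitraryProfileDefWithVoids','IfcProfileProperties','IfcReinforcementBarProperties','IfcSectionProperties','IfcSectionReinforcementProperties',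
--                      'IfcLayeredItem','IfcLightDistributionCurveEnum','IfcLightEmissionSourceEnum','IfcLightDistributionData','IfcLightIntensityDistribution','IfcLightSourceAmbient',
--                      'IfcLightSourceDirectional','IfcLightSourceGoniometric','IfcLightSourcePositional','IfcLightSourceSpot','IfcPresentationLayerAssignment','IfcPresentationLayerWithStyle',
--                      'IfcBoxAlignment','IfcTextPath','IfcAnnotationFillArea','IfcPlanarBox','IfcPlanarExtent','IfcPresentationItem','IfcTextLiteral','IfcTextLiteralWithExtent','IfcBinary',
--                      'IfcBoolean','IfcDerivedUnitEnum','IfcIdentifier','IfcInteger','IfcLabel','IfcLogical','IfcPHMeasure','IfcPositiveInteger','IfcReal','IfcSIPrefix','IfcSIUnitName','IfcText',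
--                      'IfcUnitEnum','IfcConversionBasedUnitWithOffset','IfcDerivedUnitElement','IfcDimensionalExponents','IfcUnitAssignment','IfcDirectionSenseEnum','IfcLayerSetDirectionEnum',
--                      'IfcArcIndex','IfcAxis2Placement','IfcBSplineCurveForm','IfcBSplineSurfaceForm','IfcCurveOnSurface','IfcDimensionCount','IfcKnotType','IfcLineIndex',
--                      'IfcPreferredSurfaceCurveRepresentation','IfcTransitionCode','IfcVectorOrDirection','IfcAxis1Placement','IfcAxis2Placement2D','IfcAxis2Placement3D','IfcAxis2PlacementLinear',
--                      'IfcBSplineCurveWithKnots','IfcDirection','IfcBSplineSurface','IfcBSplineSurfaceWithKnots','IfcBoundedSurface','IfcClothoid','IfcCompositeCurveOnSurface',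
--                      'IfcCompositeCurveSegment','IfcConic','IfcCosineSpiral','IfcCurveBoundedPlane','IfcCurveBoundedSurface','IfcCurveSegment','IfcCylindricalSurface','IfcElementarySurface',
--                      'IfcGeometricRepresentationItem','IfcMappedItem','IfcOffsetCurve2D','IfcOffsetCurve3D','IfcOffsetCurveByDistances','IfcPlacement','IfcPointByDistanceExpression',
--                      'IfcPointOnSurface','IfcRationalBSplineCurveWithKnots','IfcRationalBSplineSurfaceWithKnots','IfcRectangularTrimmedSurface','IfcReparametrisedCompositeCurveSegment',
--                      'IfcRepresentationItem','IfcRepresentationMap','IfcSecondOrderPolynomialSpiral','IfcSegment','IfcSeventhOrderPolynomialSpiral','IfcSineSpiral','IfcSphericalSurface',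
--                      'IfcSurfaceOfLinearExtrusion','IfcSurfaceOfRevolution','IfcSweptSurface','IfcThirdOrderPolynomialSpiral','IfcToroidalSurface','IfcBooleanOperand','IfcBooleanOperator',
--                      'IfcAdvancedBrep','IfcAdvancedBrepWithVoids','IfcBlock','IfcBooleanClippingResult','IfcBooleanResult','IfcBoundingBox','IfcBoxedHalfSpace','IfcCsgPrimitive3D',
--                      'IfcExtrudedAreaSolidTapered','IfcFaceBasedSurfaceModel','IfcFacetedBrep','IfcFacetedBrepWithVoids','IfcGeometricCurveSet','IfcGeometricSet','IfcIndexedPolygonalFace',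
--                      'IfcIndexedPolygonalFaceWithVoids','IfcManifoldSolidBrep','IfcPolygonalBoundedHalfSpace','IfcPolygonalFaceSet','IfcRectangularPyramid','IfcRevolvedAreaSolidTapered',
--                      'IfcRightCircularCone','IfcRightCircularCylinder','IfcSectionedSolidHorizontal','IfcSectionedSpine','IfcSectionedSurface','IfcShellBasedSurfaceModel','IfcSolidModel',
--                      'IfcSphere','IfcSweptDiskSolidPolygonal','IfcTessellatedFaceSet','IfcTessellatedItem','IfcTriangulatedFaceSet','IfcTriangulatedIrregularNetwork','IfcAlignmentCantSegmentTypeEnum',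
--                      'IfcAlignmentHorizontalSegmentTypeEnum','IfcAlignmentVerticalSegmentTypeEnum','IfcPointOrVertexPoint','IfcSolidOrShell','IfcSurfaceOrFaceSurface','IfcAlignmentCantSegment',
--                      'IfcAlignmentHorizontalSegment','IfcAlignmentParameterSegment','IfcAlignmentVerticalSegment','IfcGridAxis','IfcGridPlacement','IfcLinearPlacement','IfcLocalPlacement',
--                      'IfcObjectPlacement','IfcVirtualGridIntersection','IfcDocumentConfidentialityEnum','IfcLanguageId','IfcDocumentStatusEnum','IfcClassification','IfcDataOriginEnum','IfcDate',
--                      'IfcDateTime','IfcDuration','IfcRecurrenceTypeEnum','IfcTaskDurationEnum','IfcTime','IfcTimeSeriesDataTypeEnum','IfcTimeStamp','IfcEventTime','IfcIrregularTimeSeries','IfcLagTime',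
--                      'IfcRecurrencePattern','IfcRegularTimeSeries','IfcResourceTime','IfcSchedulingTime','IfcTaskTime','IfcTaskTimeRecurring','IfcTimePeriod','IfcTimeSeries','IfcWorkTime',
--                      'IfcArithmeticOperatorEnum','IfcBenchmarkEnum','IfcConstraintEnum','IfcLogicalOperatorEnum','IfcObjectiveEnum','IfcConstraint','IfcMetric','IfcObjective','IfcApproval',
--                      'IfcAddressTypeEnum','IfcRoleEnum','IfcAddressTypeEnum','IfcRoleEnum','IfcActorRole','IfcAddress','IfcOrganization','IfcPerson','IfcPersonAndOrganization','IfcPostalAddress',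
--                      'IfcTelecomAddress','IfcCurve','IfcCircle','IfcEllipse','IfcLine','IfcPlane','IfcPoint','IfcPolyline','IfcSpiral','IfcSurface','IfcVector']
--
-- # One frozenset lookup per name instead of a linear scan over the ~300-entry list,
-- # and ONE walk of the parent chain per key instead of up to ten generator re-walks.
-- _EXCLUDED_SET = frozenset(EXCLUDED_ENTITIES)
-- _SPECIAL_ANCESTORS = frozenset(["IfcPropertyAbstraction", "IfcConstraint", "IfcRepresentationItem",
--                                 "IfcPresentationItem", "IfcPresentationStyle", "IfcPropertyDefinition",
--                                 "IfcTypeObject", "IfcMaterialDefinition", "IfcMaterialUsageDefinition"])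
-- _PREFIXES = ('IfcRel', 'IfcProperty', 'IfcQuantity', 'IfcConnection', 'IfcCartesian')
-- _SUFFIXES = ('Relationship', 'Type', 'Definition', 'Usage', 'Property', 'Template', 'Resource',
--              'Select', 'Measure', 'Condition', 'ProfileDef', 'Value', 'Quantity', 'Unit', 'Curve',
--              'Number', 'Reference', 'Information', 'Solid')
--
--
-- def filter_concepts(di):
--     """ Skip certain concepts to reduce amount of definitions in bSDD. """
--
--     def ancestry(k):
--         # the parent chain, starting at k itself, built once as a list
--         out = []
--         cur = k
--         while True:
--             out.append(cur)
--             v = di.get(cur)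
--             p = v.get('Parent') if v else None
--             if not p:
--                 return out
--             cur = p
--
--     def keep(k):
--         if k in 'IfcMaterial':  # bypass (same substring test as the original)
--             return True
--         if k.startswith(_PREFIXES) or k.endswith(_SUFFIXES) or k in _EXCLUDED_SET:
--             return False
--         return not any(a in _SPECIAL_ANCESTORS or a.endswith('Resource') for a in ancestry(k))
--
--     return {k: v for k, v in di.items() if keep(k)}
-- ===== Notes on version B (the rewrite author's own statement) =====
-- stated objective: faster
-- what changed: B builds each key's parent chain once with an iterative while-loop and scans it a single time against a frozenset of the nine ancestor names (checking endswith('Resource') in the same pass), and tests exclusion membership against a frozenset, instead of A's up-to-ten separate recursive-generator re-walks of the chain and a linear scan of the ~300-entry exclusion list; the substring bypass `k in 'IfcMaterial'` is kept verbatim.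
-- outside the precondition, e.g. on filter_concepts({'IfcRelX': {'Parent': 'IfcRelX'}}): A returns {}, B returns {}
import Mathlib
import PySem

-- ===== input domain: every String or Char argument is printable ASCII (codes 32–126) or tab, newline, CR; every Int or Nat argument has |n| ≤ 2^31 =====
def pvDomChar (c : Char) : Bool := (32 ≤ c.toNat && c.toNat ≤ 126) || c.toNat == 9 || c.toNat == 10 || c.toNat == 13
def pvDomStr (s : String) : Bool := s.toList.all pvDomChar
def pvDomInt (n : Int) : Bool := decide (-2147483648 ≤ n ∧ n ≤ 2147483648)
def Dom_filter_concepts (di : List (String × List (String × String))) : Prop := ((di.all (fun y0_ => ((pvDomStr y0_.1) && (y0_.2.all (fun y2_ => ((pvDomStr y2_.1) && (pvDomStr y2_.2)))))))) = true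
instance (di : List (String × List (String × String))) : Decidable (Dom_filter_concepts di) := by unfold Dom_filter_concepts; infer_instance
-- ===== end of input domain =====

/-
  B replaces A's repeated generator re-walks (one full parent-chain walk per tested ancestor name,
  plus a linear scan of the ~300-entry exclusion list) by ONE iterative walk of the parent chain per
  key and frozenset membership tests; the substring bypass `k in 'IfcMaterial'` is kept as in A.
-/

-- ===== PORT A =====
def pvExcludedEntities : List String := ["IfcApplication", "IfcOwnerHistory", "IfcTable", "IfcTableColumn", "IfcTableRow", "IfcChangeActionEnum", "IfcGloballyUniqueId", "IfcStateEnum",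
  "IfcShell", "IfcAdvancedFace", "IfcClosedShell", "IfcConnectedFaceSet", "IfcEdge", "IfcEdgeCurve", "IfcEdgeLoop", "IfcFace",
  "IfcFaceBound", "IfcFaceOuterBound", "IfcFaceSurface", "IfcLoop", "IfcOpenShell", "IfcOrientedEdge", "IfcPath", "IfcPolyLoop",
  "IfcSubedge", "IfcTopologicalRepresentationItem", "IfcVertex", "IfcVertexLoop", "IfcVertexPoint", "IfcBoundaryNodeConditionWarping", "IfcStructuralLoadConfiguration", "IfcStructuralLoadOrResult",
  "IfcStructuralLoadSingleDisplacement", "IfcStructuralLoadSingleDisplacementDistortion", "IfcStructuralLoadSingleForceWarping", "IfcSurfaceReinforcementArea", "IfcGeometricProjectionEnum", "IfcGlobalOrLocalEnum", "IfcWellKnownTextLiteral", "IfcCoordinateOperation",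
  "IfcCoordinateReferenceSystem", "IfcGeographicCRS", "IfcGeometricRepresentationContext", "IfcGeometricRepresentationSubContext", "IfcMapConversion", "IfcMapConversionScaled", "IfcMaterialDefinitionRepresentation", "IfcProductDefinitionShape",
  "IfcProductRepresentation", "IfcProjectedCRS", "IfcRepresentation", "IfcRepresentationContext", "IfcRigidOperation", "IfcShapeAspect", "IfcShapeModel", "IfcShapeRepresentation",
  "IfcStyleModel", "IfcStyledRepresentation", "IfcTopologyRepresentation", "IfcWellKnownText", "IfcCurveInterpolationEnum", "IfcExtendedProperties", "IfcPreDefinedProperties", "IfcProfileTypeEnum",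
  "IfcReinforcingBarRoleEnum", "IfcReinforcingBarSurfaceEnum", "IfcSectionTypeEnum", "IfcArbitraryProfileDefWithVoids", "IfcProfileProperties", "IfcReinforcementBarProperties", "IfcSectionProperties", "IfcSectionReinforcementProperties",
  "IfcLayeredItem", "IfcLightDistributionCurveEnum", "IfcLightEmissionSourceEnum", "IfcLightDistributionData", "IfcLightIntensityDistribution", "IfcLightSourceAmbient", "IfcLightSourceDirectional", "IfcLightSourceGoniometric",
  "IfcLightSourcePositional", "IfcLightSourceSpot", "IfcPresentationLayerAssignment", "IfcPresentationLayerWithStyle", "IfcBoxAlignment", "IfcTextPath", "IfcAnnotationFillArea", "IfcPlanarBox",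
  "IfcPlanarExtent", "IfcPresentationItem", "IfcTextLiteral", "IfcTextLiteralWithExtent", "IfcBinary", "IfcBoolean", "IfcDerivedUnitEnum", "IfcIdentifier",
  "IfcInteger", "IfcLabel", "IfcLogical", "IfcPHMeasure", "IfcPositiveInteger", "IfcReal", "IfcSIPrefix", "IfcSIUnitName",
  "IfcText", "IfcUnitEnum", "IfcConversionBasedUnitWithOffset", "IfcDerivedUnitElement", "IfcDimensionalExponents", "IfcUnitAssignment", "IfcDirectionSenseEnum", "IfcLayerSetDirectionEnum",
  "IfcArcIndex", "IfcAxis2Placement", "IfcBSplineCurveForm", "IfcBSplineSurfaceForm", "IfcCurveOnSurface", "IfcDimensionCount", "IfcKnotType", "IfcLineIndex",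
  "IfcPreferredSurfaceCurveRepresentation", "IfcTransitionCode", "IfcVectorOrDirection", "IfcAxis1Placement", "IfcAxis2Placement2D", "IfcAxis2Placement3D", "IfcAxis2PlacementLinear", "IfcBSplineCurveWithKnots",
  "IfcDirection", "IfcBSplineSurface", "IfcBSplineSurfaceWithKnots", "IfcBoundedSurface", "IfcClothoid", "IfcCompositeCurveOnSurface", "IfcCompositeCurveSegment", "IfcConic",
  "IfcCosineSpiral", "IfcCurveBoundedPlane", "IfcCurveBoundedSurface", "IfcCurveSegment", "IfcCylindricalSurface", "IfcElementarySurface", "IfcGeometricRepresentationItem", "IfcMappedItem",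
  "IfcOffsetCurve2D", "IfcOffsetCurve3D", "IfcOffsetCurveByDistances", "IfcPlacement", "IfcPointByDistanceExpression", "IfcPointOnSurface", "IfcRationalBSplineCurveWithKnots", "IfcRationalBSplineSurfaceWithKnots",
  "IfcRectangularTrimmedSurface", "IfcReparametrisedCompositeCurveSegment", "IfcRepresentationItem", "IfcRepresentationMap", "IfcSecondOrderPolynomialSpiral", "IfcSegment", "IfcSeventhOrderPolynomialSpiral", "IfcSineSpiral",
  "IfcSphericalSurface", "IfcSurfaceOfLinearExtrusion", "IfcSurfaceOfRevolution", "IfcSweptSurface", "IfcThirdOrderPolynomialSpiral", "IfcToroidalSurface", "IfcBooleanOperand", "IfcBooleanOperator",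
  "IfcAdvancedBrep", "IfcAdvancedBrepWithVoids", "IfcBlock", "IfcBooleanClippingResult", "IfcBooleanResult", "IfcBoundingBox", "IfcBoxedHalfSpace", "IfcCsgPrimitive3D",
  "IfcExtrudedAreaSolidTapered", "IfcFaceBasedSurfaceModel", "IfcFacetedBrep", "IfcFacetedBrepWithVoids", "IfcGeometricCurveSet", "IfcGeometricSet", "IfcIndexedPolygonalFace", "IfcIndexedPolygonalFaceWithVoids",
  "IfcManifoldSolidBrep", "IfcPolygonalBoundedHalfSpace", "IfcPolygonalFaceSet", "IfcRectangularPyramid", "IfcRevolvedAreaSolidTapered", "IfcRightCircularCone", "IfcRightCircularCylinder", "IfcSectionedSolidHorizontal",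
  "IfcSectionedSpine", "IfcSectionedSurface", "IfcShellBasedSurfaceModel", "IfcSolidModel", "IfcSphere", "IfcSweptDiskSolidPolygonal", "IfcTessellatedFaceSet", "IfcTessellatedItem",
  "IfcTriangulatedFaceSet", "IfcTriangulatedIrregularNetwork", "IfcAlignmentCantSegmentTypeEnum", "IfcAlignmentHorizontalSegmentTypeEnum", "IfcAlignmentVerticalSegmentTypeEnum", "IfcPointOrVertexPoint", "IfcSolidOrShell", "IfcSurfaceOrFaceSurface",
  "IfcAlignmentCantSegment", "IfcAlignmentHorizontalSegment", "IfcAlignmentParameterSegment", "IfcAlignmentVerticalSegment", "IfcGridAxis", "IfcGridPlacement", "IfcLinearPlacement", "IfcLocalPlacement",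
  "IfcObjectPlacement", "IfcVirtualGridIntersection", "IfcDocumentConfidentialityEnum", "IfcLanguageId", "IfcDocumentStatusEnum", "IfcClassification", "IfcDataOriginEnum", "IfcDate",
  "IfcDateTime", "IfcDuration", "IfcRecurrenceTypeEnum", "IfcTaskDurationEnum", "IfcTime", "IfcTimeSeriesDataTypeEnum", "IfcTimeStamp", "IfcEventTime",
  "IfcIrregularTimeSeries", "IfcLagTime", "IfcRecurrencePattern", "IfcRegularTimeSeries", "IfcResourceTime", "IfcSchedulingTime", "IfcTaskTime", "IfcTaskTimeRecurring",
  "IfcTimePeriod", "IfcTimeSeries", "IfcWorkTime", "IfcArithmeticOperatorEnum", "IfcBenchmarkEnum", "IfcConstraintEnum", "IfcLogicalOperatorEnum", "IfcObjectiveEnum",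
  "IfcConstraint", "IfcMetric", "IfcObjective", "IfcApproval", "IfcAddressTypeEnum", "IfcRoleEnum", "IfcAddressTypeEnum", "IfcRoleEnum",
  "IfcActorRole", "IfcAddress", "IfcOrganization", "IfcPerson", "IfcPersonAndOrganization", "IfcPostalAddress", "IfcTelecomAddress", "IfcCurve",
  "IfcCircle", "IfcEllipse", "IfcLine", "IfcPlane", "IfcPoint", "IfcPolyline", "IfcSpiral", "IfcSurface",
  "IfcVector"]

-- di.get(k): first-match lookup in the association list (Python dict lookup)
def pvGetA {v : Type} : List (String × v) → String → Option v
  | [], _ => none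
  | (k', x) :: rest, k => if k' = k then some x else pvGetA rest k

-- `v = di.get(k); if v and v.get('Parent'):` — the next element of A's `parents` generator (none = stop)
def pvStepA (di : List (String × List (String × String))) (k : String) : Option String :=
  match pvGetA di k with
  | some v => if v = [] then none else
      match pvGetA v "Parent" with
      | some p => if p = "" then none else some p
      | none => none
  | none => none

-- list(parents(k)): A's recursive generator; fuel bounds the recursion (sufficient on acyclic chains)
def pvParentsA (di : List (String × List (String × String))) : Nat → String → List String
  | 0, k => [k]
  | f + 1, k => k :: (match pvStepA di k with
      | some p => pvParentsA di f p
      | none => [])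

def pvShouldInclude (di : List (String × List (String × String))) (k : String) : Bool :=
  if !((["IfcRel", "IfcProperty", "IfcProperty", "IfcQuantity", "IfcConnection", "IfcCartesian"].any
        (fun p => PySem.Str.startswith k p))
    || (["Relationship", "Type", "Definition", "Usage", "Property", "Template", "Resource", "Select",
         "Measure", "Condition", "ProfileDef", "Value", "Property", "Quantity", "Unit", "Curve",
         "Number", "Reference", "Information", "Solid"].any (fun s => PySem.Str.endswith k s))
    || (["IfcPropertyAbstraction", "IfcConstraint", "IfcRepresentationItem", "IfcPresentationItem",
         "IfcPresentationStyle", "IfcPropertyDefinition", "IfcTypeObject", "IfcMaterialDefinition",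
         "IfcMaterialUsageDefinition"].any (fun x => (pvParentsA di di.length k).contains x))
    || ((pvParentsA di di.length k).any (fun z => PySem.Str.endswith z "Resource"))
    || (pvExcludedEntities.contains k)) then true
  else if PySem.Str.isIn k "IfcMaterial" then true   -- Python's `k in ('IfcMaterial')` substring test
  else false

def filter_concepts (di : List (String × List (String × String))) : List (String × List (String × String)) :=
  di.filter (fun kv => pvShouldInclude di kv.1)

-- ===== PORT B =====
def pvExcludedSet : PySem.Set String := PySem.Set.ofList pvExcludedEntities
def pvSpecialAncestors : PySem.Set String :=
  PySem.Set.ofList ["IfcPropertyAbstraction", "IfcConstraint", "IfcRepresentationItem",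
    "IfcPresentationItem", "IfcPresentationStyle", "IfcPropertyDefinition", "IfcTypeObject",
    "IfcMaterialDefinition", "IfcMaterialUsageDefinition"]
def pvPrefixes : List String := ["IfcRel", "IfcProperty", "IfcQuantity", "IfcConnection", "IfcCartesian"]
def pvSuffixes : List String :=
  ["Relationship", "Type", "Definition", "Usage", "Property", "Template", "Resource", "Select",
   "Measure", "Condition", "ProfileDef", "Value", "Quantity", "Unit", "Curve", "Number",
   "Reference", "Information", "Solid"]

-- `p = v.get('Parent') if v else None` of B's while loop
def pvStepB (di : List (String × List (String × String))) (cur : String) : Option String :=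
  match pvGetA di cur with
  | some v => if v = [] then none else pvGetA v "Parent"
  | none => none

-- B's while loop: out.append(cur); p = step; if not p: return out; cur = p   (fuel bounds the loop)
def pvAncestryB (di : List (String × List (String × String))) :
    Nat → String → List String → List String
  | 0, cur, out => out ++ [cur]
  | f + 1, cur, out =>
      match pvStepB di cur with
      | some p => if p = "" then out ++ [cur] else pvAncestryB di f p (out ++ [cur])
      | none => out ++ [cur]

def pvKeep (di : List (String × List (String × String))) (k : String) : Bool :=
  if PySem.Str.isIn k "IfcMaterial" then true        -- same substring bypass as A
  else if (pvPrefixes.any (fun p => PySem.Str.startswith k p))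
       || (pvSuffixes.any (fun s => PySem.Str.endswith k s))
       || (PySem.Set.contains pvExcludedSet k) then false
  else !((pvAncestryB di di.length k []).any
      (fun a => PySem.Set.contains pvSpecialAncestors a || PySem.Str.endswith a "Resource"))

def filter_concepts_alt (di : List (String × List (String × String))) : List (String × List (String × String)) :=
  di.filter (fun kv => pvKeep di kv.1)

-- ===== PRECONDITION & SPEC =====
-- the Parent edge of the concept graph: k's non-empty Parent entry, if k has one
def pvParentEdge (di : List (String × List (String × String))) (k : String) : Option String :=
  match di.find? (fun kv => kv.1 = k) with
  | some kv =>
      match kv.2.find? (fun e => e.1 = "Parent") with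
      | some e => if e.2 = "" then none else some e.2
      | none => none
  | none => none

-- Pre_ excludes inputs whose Parent chain contains a cycle (some key is its own proper
-- Parent-ancestor): there Python A either raises RecursionError or, when a prefix/suffix test or
-- an early ancestor hit short-circuits the walk, returns a value — while B's chain-building
-- while-loop would not terminate.
def Pre_filter_concepts (di : List (String × List (String × String))) : Prop :=
  ∀ k ∈ di.map Prod.fst, ∀ n ∈ List.range di.length,
    (fun o => o.bind (pvParentEdge di))^[n + 1] (some k) ≠ some k
instance (di : List (String × List (String × String))) : Decidable (Pre_filter_concepts di) := by
  unfold Pre_filter_concepts; infer_instance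

def pvWitness_filter_concepts : (List (String × List (String × String))) :=
  [("IfcWall", [("Parent", "IfcRoot")]), ("IfcRoot", [])]

def Spec_filter_concepts (di : List (String × List (String × String))) (out : List (String × List (String × String))) : Prop := out = filter_concepts_alt di
instance (di : List (String × List (String × String))) (out : List (String × List (String × String))) : Decidable (Spec_filter_concepts di out) := by unfold Spec_filter_concepts; infer_instance

-- ===== CLAIM (what is proved, stated in full; the proofs are below) =====
def Claim_equal_filter_concepts : Prop := ∀ (di : List (String × List (String × String))), Dom_filter_concepts di → Pre_filter_concepts di → Spec_filter_concepts di (filter_concepts di)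

-- ===== LEMMAS AND PROOFS =====

-- B's step stripped of empty-string parents is A's step
theorem pvStepB_eq (di : List (String × List (String × String))) (k : String) :
    pvStepA di k = (match pvStepB di k with
      | some p => if p = "" then none else some p
      | none => none) := by
  unfold pvStepA pvStepB
  cases pvGetA di k with
  | none => rfl
  | some v =>
      by_cases hv : v = []
      · simp [hv]
      · cases hP : pvGetA v "Parent" <;> simp [hv, hP]

-- B's while loop builds exactly A's parents list (appended to the accumulator)
theorem pvAncestryB_eq (di : List (String × List (String × String))) :
    ∀ (f : Nat) (k : String) (out : List String),
      pvAncestryB di f k out = out ++ pvParentsA di f k := by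
  intro f
  induction f with
  | zero => intro k out; rfl
  | succ f ih =>
      intro k out
      rw [pvAncestryB, pvParentsA, pvStepB_eq]
      cases h : pvStepB di k with
      | none => simp
      | some p =>
          by_cases hp : p = "" <;> simp [hp, ih]

-- the truth table of the two predicate shapes, with A's two ancestor scans merged into B's one
theorem pv_bool_shape (pre suf n r exc byp anc : Bool) (h : (n || r) = anc) :
    (if !(pre || suf || n || r || exc) then true else if byp then true else false)
    = (if byp then true else if pre || suf || exc then false else !anc) := by
  subst h
  cases pre <;> cases suf <;> cases n <;> cases r <;> cases exc <;> cases byp <;> rfl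

-- the per-key predicates agree
theorem keep_eq (di : List (String × List (String × String))) (k : String) :
    pvShouldInclude di k = pvKeep di k := by
  unfold pvShouldInclude pvKeep
  rw [pvAncestryB_eq, List.nil_append]
  have h1 : (["IfcRel", "IfcProperty", "IfcProperty", "IfcQuantity", "IfcConnection", "IfcCartesian"].any
      (fun p => PySem.Str.startswith k p)) = (pvPrefixes.any (fun p => PySem.Str.startswith k p)) := by
    cases hP : PySem.Str.startswith k "IfcProperty" <;>
      simp only [pvPrefixes, List.any_cons, List.any_nil, hP, Bool.or_false, Bool.false_or,
        Bool.or_true, Bool.true_or]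
  have h2 : (["Relationship", "Type", "Definition", "Usage", "Property", "Template", "Resource", "Select",
         "Measure", "Condition", "ProfileDef", "Value", "Property", "Quantity", "Unit", "Curve",
         "Number", "Reference", "Information", "Solid"].any (fun s => PySem.Str.endswith k s))
      = (pvSuffixes.any (fun s => PySem.Str.endswith k s)) := by
    cases hP : PySem.Str.endswith k "Property" <;>
      simp only [pvSuffixes, List.any_cons, List.any_nil, hP, Bool.or_false, Bool.false_or,
        Bool.or_true, Bool.true_or]
  have h4 : (pvExcludedEntities.contains k) = (PySem.Set.contains pvExcludedSet k) := by
    rw [Bool.eq_iff_iff, List.contains_iff_mem, PySem.Set.contains_iff, pvExcludedSet]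
    exact (PySem.Set.mem_ofList _ _).symm
  have h3 : ((["IfcPropertyAbstraction", "IfcConstraint", "IfcRepresentationItem", "IfcPresentationItem",
         "IfcPresentationStyle", "IfcPropertyDefinition", "IfcTypeObject", "IfcMaterialDefinition",
         "IfcMaterialUsageDefinition"].any (fun x => (pvParentsA di di.length k).contains x))
      || ((pvParentsA di di.length k).any (fun z => PySem.Str.endswith z "Resource")))
      = ((pvParentsA di di.length k).any
          (fun a => PySem.Set.contains pvSpecialAncestors a || PySem.Str.endswith a "Resource")) := by
    rw [Bool.eq_iff_iff]
    simp only [Bool.or_eq_true, List.any_eq_true, List.contains_iff_mem,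
      PySem.Set.contains_iff, PySem.Set.mem_ofList, pvSpecialAncestors]
    constructor
    · rintro (⟨x, hx, hc⟩ | ⟨a, ha, hr⟩)
      · exact ⟨x, hc, Or.inl hx⟩
      · exact ⟨a, ha, Or.inr hr⟩
    · rintro ⟨a, ha, hn | hr⟩
      · exact Or.inl ⟨a, hn, ha⟩
      · exact Or.inr ⟨a, ha, hr⟩
  rw [h1, h2, h4]
  exact pv_bool_shape _ _ _ _ _ _ _ h3

-- ===== VERDICT (by name: the statement is the Claim_ definition above) =====
theorem filter_concepts_spec : Claim_equal_filter_concepts := by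
  intro di _ _
  unfold Spec_filter_concepts filter_concepts filter_concepts_alt
  exact List.filter_congr (fun kv _ => keep_eq di kv.1)
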